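-- pv_equiv track=rewrite | github.com/M1u1N/lightprojekt | music.py | build_led_index_map
-- ===== SOURCE A (Python) =====
-- def build_led_index_map(num_leds, columns):
--     leds_per_col = num_leds // columns
--     remainder = num_leds % columns
--     map_cols = []
--     idx = 0
--     for c in range(columns):
--         this_col_len = leds_per_col + (1 if c < remainder else 0)
--         col_indices = [i + 1 for i in range(idx, idx + this_col_len)]
--         map_cols.append(col_indices)
--         idx += this_col_len
--     return map_cols
-- ===== SOURCE B (Python) =====
-- def build_led_index_map(num_leds, columns):
--     base = num_leds // columns
--     rem = num_leds % columns
--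
--     def start(c):
--         return c * base + min(c, rem)
--
--     return [[j + 1 for j in range(start(c), start(c + 1))] for c in range(columns)]
-- ===== Notes on version B (the rewrite author's own statement) =====
-- stated objective: simpler
-- what changed: Each column is built independently from a closed-form start offset c*base + min(c, rem) instead of threading a running idx accumulator through the loop.
import Mathlib
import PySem

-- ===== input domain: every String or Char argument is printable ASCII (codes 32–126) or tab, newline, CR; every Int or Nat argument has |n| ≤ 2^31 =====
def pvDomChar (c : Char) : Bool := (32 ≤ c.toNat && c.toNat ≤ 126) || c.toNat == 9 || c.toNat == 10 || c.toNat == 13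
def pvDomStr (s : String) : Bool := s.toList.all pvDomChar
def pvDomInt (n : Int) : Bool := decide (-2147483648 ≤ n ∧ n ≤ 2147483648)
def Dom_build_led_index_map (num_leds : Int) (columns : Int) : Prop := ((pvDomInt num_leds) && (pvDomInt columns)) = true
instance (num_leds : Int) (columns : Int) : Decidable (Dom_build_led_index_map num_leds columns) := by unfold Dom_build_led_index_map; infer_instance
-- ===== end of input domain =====

-- B builds each column independently from a closed-form start offset c*base + min(c, rem)
-- instead of threading a running idx accumulator through the loop (objective: simpler).

-- ===== PORT A =====
def build_led_index_map (num_leds : Int) (columns : Int) : List (List Int) :=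
  let leds_per_col := PySem.Int.floordiv num_leds columns
  let remainder := PySem.Int.mod num_leds columns
  ((PySem.List.pyRange 0 columns 1).foldl
    (fun (s : List (List Int) × Int) c =>
      let this_col_len := leds_per_col + (if c < remainder then 1 else 0)
      let col_indices := (PySem.List.pyRange s.2 (s.2 + this_col_len) 1).map (fun i => i + 1)
      (s.1 ++ [col_indices], s.2 + this_col_len))
    ([], 0)).1

-- ===== PORT B =====
def build_led_index_map_alt (num_leds : Int) (columns : Int) : List (List Int) :=
  let base := PySem.Int.floordiv num_leds columns
  let rem := PySem.Int.mod num_leds columns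
  let start := fun (c : Int) => c * base + min c rem
  (PySem.List.pyRange 0 columns 1).map
    (fun c => (PySem.List.pyRange (start c) (start (c + 1)) 1).map (fun j => j + 1))

-- ===== PRECONDITION & SPEC =====
-- Pre_ excludes exactly columns = 0, where Python's '//' and '%' raise ZeroDivisionError.
def Pre_build_led_index_map (num_leds : Int) (columns : Int) : Prop := columns ≠ 0
instance (num_leds : Int) (columns : Int) : Decidable (Pre_build_led_index_map num_leds columns) := by unfold Pre_build_led_index_map; infer_instance
def pvWitness_build_led_index_map : Int × Int := (7, 3)

def Spec_build_led_index_map (num_leds : Int) (columns : Int) (out : List (List Int)) : Prop := out = build_led_index_map_alt num_leds columns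
instance (num_leds : Int) (columns : Int) (out : List (List Int)) : Decidable (Spec_build_led_index_map num_leds columns out) := by unfold Spec_build_led_index_map; infer_instance

-- ===== CLAIM (what is proved, stated in full; the proofs are below) =====
def Claim_equal_build_led_index_map : Prop := ∀ (num_leds : Int) (columns : Int), Dom_build_led_index_map num_leds columns → Pre_build_led_index_map num_leds columns → Spec_build_led_index_map num_leds columns (build_led_index_map num_leds columns)

-- ===== LEMMAS AND PROOFS =====

-- Loop invariant of A's fold: after c iterations the accumulated idx is the closed-form
-- start offset c*base + min c rem, and the columns built so far are B's columns.
lemma fold_inv (base rem : Int) (hrem : 0 ≤ rem) (k : Nat) :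
    ((PySem.List.pyRange 0 (k : Int) 1).foldl
      (fun (s : List (List Int) × Int) c =>
        (s.1 ++ [(PySem.List.pyRange s.2 (s.2 + (base + (if c < rem then 1 else 0))) 1).map (fun i => i + 1)],
         s.2 + (base + (if c < rem then 1 else 0))))
      ([], 0))
    = ((PySem.List.pyRange 0 (k : Int) 1).map
        (fun c => (PySem.List.pyRange (c * base + min c rem) ((c + 1) * base + min (c + 1) rem) 1).map (fun j => j + 1)),
       (k : Int) * base + min (k : Int) rem) := by
  induction k with
  | zero =>
    rw [PySem.List.pyRange_one_eq_nil (by omega)]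
    simp
    omega
  | succ k ih =>
    have hsplit : PySem.List.pyRange 0 ((k : Int) + 1) 1
        = PySem.List.pyRange 0 (k : Int) 1 ++ [(k : Int)] :=
      PySem.List.pyRange_one_succ_right (by positivity)
    push_cast
    rw [hsplit, List.foldl_append, List.map_append, ih]
    have hexp : ((k : Int) + 1) * base = (k : Int) * base + base := by ring
    have hnext : (k : Int) * base + min (k : Int) rem + (base + (if (k : Int) < rem then 1 else 0))
        = ((k : Int) + 1) * base + min ((k : Int) + 1) rem := by
      rw [hexp]
      generalize (k : Int) * base = p
      split_ifs <;> omega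
    simp [hnext]

-- ===== VERDICT (by name: the statement is the Claim_ definition above) =====
theorem build_led_index_map_spec : Claim_equal_build_led_index_map := by
  intro n cols _ hpre
  unfold Spec_build_led_index_map build_led_index_map build_led_index_map_alt
  rcases lt_trichotomy cols 0 with hneg | hz | hpos
  · rw [PySem.List.pyRange_one_eq_nil (by omega)]
    simp
  · exact absurd hz hpre
  · have hrem : 0 ≤ PySem.Int.mod n cols := by
      rw [PySem.Int.mod_eq_emod_of_pos hpos]
      exact Int.emod_nonneg n (by omega)
    obtain ⟨k, rfl⟩ := Int.eq_ofNat_of_zero_le (le_of_lt hpos)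
    simpa using congrArg Prod.fst
      (fold_inv (PySem.Int.floordiv n (k : Int)) (PySem.Int.mod n (k : Int)) hrem k)
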